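-- pv_equiv track=rewrite | github.com/yarens8/VisionQA | backend/core/agents/case_generator.py | _infer_context_from_url
-- ===== SOURCE A (Python) =====
-- def _infer_context_from_url(url: str) -> str:
--     """
--     URL'e bakarak sayfa içeriğini tahmin eder.
--     Screenshot alınamadığında fallback olarak kullanılır.
--     """
--     url_lower = url.lower()
--     context_parts = [f"URL: {url}"]
--
--     # URL'den sayfa tipini çıkar
--     if any(k in url_lower for k in ["login", "signin", "auth"]):
--         context_parts.append("Page Type: Login/Authentication Page")
--         context_parts.append("Expected Elements: username field, password field, login button, forgot password link")
--     elif any(k in url_lower for k in ["register", "signup", "kayit"]):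
--         context_parts.append("Page Type: Registration Page")
--         context_parts.append("Expected Elements: name, email, password, confirm password fields, register button")
--     elif any(k in url_lower for k in ["cart", "sepet", "basket"]):
--         context_parts.append("Page Type: Shopping Cart")
--         context_parts.append("Expected Elements: product list, quantity input, remove button, checkout button, total price")
--     elif any(k in url_lower for k in ["checkout", "payment", "odeme"]):
--         context_parts.append("Page Type: Checkout/Payment Page")
--         context_parts.append("Expected Elements: address form, payment fields, credit card input, order button")
--     elif any(k in url_lower for k in ["search", "arama"]):
--         context_parts.append("Page Type: Search Results Page")
--         context_parts.append("Expected Elements: search bar, filter options, product cards, pagination")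
--     elif any(k in url_lower for k in ["product", "urun", "item"]):
--         context_parts.append("Page Type: Product Detail Page")
--         context_parts.append("Expected Elements: product image, title, price, add to cart button, quantity selector")
--     elif any(k in url_lower for k in ["dashboard", "panel", "admin"]):
--         context_parts.append("Page Type: Dashboard/Admin Panel")
--         context_parts.append("Expected Elements: navigation menu, statistics cards, data tables, action buttons")
--     elif any(k in url_lower for k in ["profile", "account", "hesap"]):
--         context_parts.append("Page Type: User Profile/Account Page")
--         context_parts.append("Expected Elements: profile form, avatar, save button, password change section")
--     else:
--         context_parts.append("Page Type: General Web Application")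
--         context_parts.append("Expected Elements: navigation, content area, forms, buttons, links")
--
--     return "\n".join(context_parts)
-- ===== SOURCE B (Python) =====
-- # Different algorithm: instead of testing each keyword with `k in url` per branch,
-- # scan the URL once position by position and look up every fixed-length window in a
-- # keyword->priority hash map, keeping the minimum priority seen; the priority then
-- # indexes the page-type table.  Correct because group g's branch fires in A exactly
-- # when some keyword of priority g occurs as a substring, i.e. some window equals it,
-- # and A's first-match chain returns the minimal matching priority.
--
-- _KEYWORD_PRIORITY = {
--     "login": 0, "signin": 0, "auth": 0,
--     "register": 1, "signup": 1, "kayit": 1,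
--     "cart": 2, "sepet": 2, "basket": 2,
--     "checkout": 3, "payment": 3, "odeme": 3,
--     "search": 4, "arama": 4,
--     "product": 5, "urun": 5, "item": 5,
--     "dashboard": 6, "panel": 6, "admin": 6,
--     "profile": 7, "account": 7, "hesap": 7,
-- }
--
-- # the distinct keyword lengths, ascending
-- _WINDOW_LENGTHS = (4, 5, 6, 7, 8, 9)
--
-- _PAGES = (
--     ("Page Type: Login/Authentication Page",
--      "Expected Elements: username field, password field, login button, forgot password link"),
--     ("Page Type: Registration Page",
--      "Expected Elements: name, email, password, confirm password fields, register button"),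
--     ("Page Type: Shopping Cart",
--      "Expected Elements: product list, quantity input, remove button, checkout button, total price"),
--     ("Page Type: Checkout/Payment Page",
--      "Expected Elements: address form, payment fields, credit card input, order button"),
--     ("Page Type: Search Results Page",
--      "Expected Elements: search bar, filter options, product cards, pagination"),
--     ("Page Type: Product Detail Page",
--      "Expected Elements: product image, title, price, add to cart button, quantity selector"),
--     ("Page Type: Dashboard/Admin Panel",
--      "Expected Elements: navigation menu, statistics cards, data tables, action buttons"),
--     ("Page Type: User Profile/Account Page",
--      "Expected Elements: profile form, avatar, save button, password change section"),
--     ("Page Type: General Web Application",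
--      "Expected Elements: navigation, content area, forms, buttons, links"),
-- )
--
--
-- def _infer_context_from_url(url: str) -> str:
--     url_lower = url.lower()
--     best = 8  # index of the default entry
--     for i in range(len(url_lower)):
--         for length in _WINDOW_LENGTHS:
--             p = _KEYWORD_PRIORITY.get(url_lower[i:i + length])
--             if p is not None and p < best:
--                 best = p
--     page_type, elements = _PAGES[best]
--     return "\n".join(["URL: " + url, page_type, elements])
-- ===== Notes on version B (the rewrite author's own statement) =====
-- stated objective: alternative
-- what changed: Instead of A's eight-branch chain of `keyword in url` substring tests, B scans the lowercased URL once position by position, looks up each fixed-length window in a keyword->priority hash map, keeps the minimum priority seen, and uses it to index a page-type table (the minimum matching priority equals A's first matching branch).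
import Mathlib
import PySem

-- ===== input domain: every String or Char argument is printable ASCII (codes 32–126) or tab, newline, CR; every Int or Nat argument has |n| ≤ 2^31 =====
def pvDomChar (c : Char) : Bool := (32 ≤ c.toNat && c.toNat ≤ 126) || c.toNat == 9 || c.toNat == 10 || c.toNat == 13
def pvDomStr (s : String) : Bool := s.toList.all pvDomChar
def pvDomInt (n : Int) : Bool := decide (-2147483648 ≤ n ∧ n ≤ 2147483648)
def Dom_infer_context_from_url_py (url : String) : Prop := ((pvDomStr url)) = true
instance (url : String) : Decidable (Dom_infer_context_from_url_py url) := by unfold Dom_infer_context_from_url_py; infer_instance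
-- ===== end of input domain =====

-- B replaces A's eight-branch chain of `keyword in url` tests by a single left-to-right scan of the
-- URL whose fixed-length windows are looked up in a keyword->priority map, keeping the minimum
-- priority; the minimum indexes the page table (alternative algorithm, same observable result).

-- ===== PORT A =====
def infer_context_from_url_py (url : String) : String :=
  let url_lower := PySem.Str.lower url
  let context_parts := ["URL: " ++ url]
  let context_parts :=
    if ["login", "signin", "auth"].any (fun k => PySem.Str.isIn k url_lower) then
      context_parts ++ ["Page Type: Login/Authentication Page",
        "Expected Elements: username field, password field, login button, forgot password link"]
    else if ["register", "signup", "kayit"].any (fun k => PySem.Str.isIn k url_lower) then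
      context_parts ++ ["Page Type: Registration Page",
        "Expected Elements: name, email, password, confirm password fields, register button"]
    else if ["cart", "sepet", "basket"].any (fun k => PySem.Str.isIn k url_lower) then
      context_parts ++ ["Page Type: Shopping Cart",
        "Expected Elements: product list, quantity input, remove button, checkout button, total price"]
    else if ["checkout", "payment", "odeme"].any (fun k => PySem.Str.isIn k url_lower) then
      context_parts ++ ["Page Type: Checkout/Payment Page",
        "Expected Elements: address form, payment fields, credit card input, order button"]
    else if ["search", "arama"].any (fun k => PySem.Str.isIn k url_lower) then
      context_parts ++ ["Page Type: Search Results Page",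
        "Expected Elements: search bar, filter options, product cards, pagination"]
    else if ["product", "urun", "item"].any (fun k => PySem.Str.isIn k url_lower) then
      context_parts ++ ["Page Type: Product Detail Page",
        "Expected Elements: product image, title, price, add to cart button, quantity selector"]
    else if ["dashboard", "panel", "admin"].any (fun k => PySem.Str.isIn k url_lower) then
      context_parts ++ ["Page Type: Dashboard/Admin Panel",
        "Expected Elements: navigation menu, statistics cards, data tables, action buttons"]
    else if ["profile", "account", "hesap"].any (fun k => PySem.Str.isIn k url_lower) then
      context_parts ++ ["Page Type: User Profile/Account Page",
        "Expected Elements: profile form, avatar, save button, password change section"]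
    else
      context_parts ++ ["Page Type: General Web Application",
        "Expected Elements: navigation, content area, forms, buttons, links"]
  PySem.Str.join "\n" context_parts

-- ===== PORT B =====
-- _KEYWORD_PRIORITY (python dict literal, string keys as char lists)
def pvKw : PySem.Dict (List Char) Nat := PySem.Dict.ofList
  [ ("login".toList, 0), ("signin".toList, 0), ("auth".toList, 0),
    ("register".toList, 1), ("signup".toList, 1), ("kayit".toList, 1),
    ("cart".toList, 2), ("sepet".toList, 2), ("basket".toList, 2),
    ("checkout".toList, 3), ("payment".toList, 3), ("odeme".toList, 3),
    ("search".toList, 4), ("arama".toList, 4),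
    ("product".toList, 5), ("urun".toList, 5), ("item".toList, 5),
    ("dashboard".toList, 6), ("panel".toList, 6), ("admin".toList, 6),
    ("profile".toList, 7), ("account".toList, 7), ("hesap".toList, 7) ]

-- _WINDOW_LENGTHS
def pvLens : List Int := [4, 5, 6, 7, 8, 9]

-- _PAGES
def pvPages : List (String × String) :=
  [ ("Page Type: Login/Authentication Page",
     "Expected Elements: username field, password field, login button, forgot password link"),
    ("Page Type: Registration Page",
     "Expected Elements: name, email, password, confirm password fields, register button"),
    ("Page Type: Shopping Cart",
     "Expected Elements: product list, quantity input, remove button, checkout button, total price"),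
    ("Page Type: Checkout/Payment Page",
     "Expected Elements: address form, payment fields, credit card input, order button"),
    ("Page Type: Search Results Page",
     "Expected Elements: search bar, filter options, product cards, pagination"),
    ("Page Type: Product Detail Page",
     "Expected Elements: product image, title, price, add to cart button, quantity selector"),
    ("Page Type: Dashboard/Admin Panel",
     "Expected Elements: navigation menu, statistics cards, data tables, action buttons"),
    ("Page Type: User Profile/Account Page",
     "Expected Elements: profile form, avatar, save button, password change section"),
    ("Page Type: General Web Application",
     "Expected Elements: navigation, content area, forms, buttons, links") ]

def infer_context_from_url_py_alt (url : String) : String :=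
  let u := (PySem.Str.lower url).toList
  -- for i in range(len(url_lower)): for length in _WINDOW_LENGTHS: p = dict.get(window); if p < best: best = p
  let best := (PySem.List.pyRange 0 u.length 1).foldl
    (fun best i => pvLens.foldl
      (fun best L =>
        match PySem.Dict.get? pvKw (PySem.List.slice u (some i) (some (i + L))) with
        | some p => if p < best then p else best
        | none => best) best) 8
  let pr := pvPages.getD best ("", "")   -- _PAGES[best]; best ≤ 8 always, plain index
  PySem.Str.join "\n" ["URL: " ++ url, pr.1, pr.2]

-- ===== PRECONDITION & SPEC =====
def Spec_infer_context_from_url_py (url : String) (out : String) : Prop := out = infer_context_from_url_py_alt url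
instance (url : String) (out : String) : Decidable (Spec_infer_context_from_url_py url out) := by unfold Spec_infer_context_from_url_py; infer_instance

-- ===== CLAIM (what is proved, stated in full; the proofs are below) =====
def Claim_equal_infer_context_from_url_py : Prop := ∀ (url : String), Dom_infer_context_from_url_py url → Spec_infer_context_from_url_py url (infer_context_from_url_py url)

-- ===== LEMMAS AND PROOFS =====

-- proof-side views of B's loop
def pvUpd (b : Nat) (o : Option Nat) : Nat :=
  match o with
  | some p => if p < b then p else b
  | none => b

def pvLook (u : List Char) (x : Int × Int) : Option Nat :=
  PySem.Dict.get? pvKw (PySem.List.slice u (some x.1) (some (x.1 + x.2)))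

def pvPairs (u : List Char) : List (Int × Int) :=
  (PySem.List.pyRange 0 u.length 1).flatMap (fun i => pvLens.map (fun L => (i, L)))

def pvBest (u : List Char) : Nat := (pvPairs u).foldl (fun b x => pvUpd b (pvLook u x)) 8

-- the keyword groups, indexed by priority (group 8 and beyond: empty)
def pvGroupKeys : Nat → List String
  | 0 => ["login", "signin", "auth"]
  | 1 => ["register", "signup", "kayit"]
  | 2 => ["cart", "sepet", "basket"]
  | 3 => ["checkout", "payment", "odeme"]
  | 4 => ["search", "arama"]
  | 5 => ["product", "urun", "item"]
  | 6 => ["dashboard", "panel", "admin"]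
  | 7 => ["profile", "account", "hesap"]
  | _ => []

lemma pvKw_eq_mk : pvKw = PySem.Dict.mk
  [ ("login".toList, 0), ("signin".toList, 0), ("auth".toList, 0),
    ("register".toList, 1), ("signup".toList, 1), ("kayit".toList, 1),
    ("cart".toList, 2), ("sepet".toList, 2), ("basket".toList, 2),
    ("checkout".toList, 3), ("payment".toList, 3), ("odeme".toList, 3),
    ("search".toList, 4), ("arama".toList, 4),
    ("product".toList, 5), ("urun".toList, 5), ("item".toList, 5),
    ("dashboard".toList, 6), ("panel".toList, 6), ("admin".toList, 6),
    ("profile".toList, 7), ("account".toList, 7), ("hesap".toList, 7) ] := by decide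

lemma pv_foldl_flatMap {α β : Type} (l : List α) (m : α → List β) (f : Nat → β → Nat) (b : Nat) :
    l.foldl (fun b a => (m a).foldl f b) b = (l.flatMap m).foldl f b := by
  induction l generalizing b with
  | nil => rfl
  | cons a t ih => simp [List.flatMap_cons, List.foldl_append, ih]

lemma pv_alt_eq (url : String) :
    infer_context_from_url_py_alt url =
      PySem.Str.join "\n" ["URL: " ++ url,
        (pvPages.getD (pvBest ((PySem.Str.lower url).toList)) ("", "")).1,
        (pvPages.getD (pvBest ((PySem.Str.lower url).toList)) ("", "")).2] := by
  unfold infer_context_from_url_py_alt pvBest pvPairs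
  rw [← pv_foldl_flatMap]
  rfl

lemma pv_foldUpd {α : Type} (m : α → Option Nat) (l : List α) (b : Nat) :
    (l.foldl (fun b x => pvUpd b (m x)) b ≤ b)
  ∧ ((l.foldl (fun b x => pvUpd b (m x)) b = b) ∨ ∃ x ∈ l, m x = some (l.foldl (fun b x => pvUpd b (m x)) b))
  ∧ (∀ x ∈ l, ∀ p, m x = some p → l.foldl (fun b x => pvUpd b (m x)) b ≤ p) := by
  induction l generalizing b with
  | nil => exact ⟨le_refl _, Or.inl rfl, by simp⟩
  | cons a t ih =>
    obtain ⟨ih1, ih2, ih3⟩ := ih (pvUpd b (m a))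
    have hfc : List.foldl (fun b x => pvUpd b (m x)) b (a :: t)
        = List.foldl (fun b x => pvUpd b (m x)) (pvUpd b (m a)) t := rfl
    have hub : pvUpd b (m a) ≤ b := by
      unfold pvUpd; cases m a with
      | none => exact le_refl _
      | some q => dsimp only; split <;> omega
    rw [hfc]
    refine ⟨ih1.trans hub, ?_, ?_⟩
    · rcases ih2 with h | ⟨x, hx, hmx⟩
      · cases hma : m a with
        | none =>
          rw [hma] at h
          have e : pvUpd b none = b := rfl
          rw [e] at h; exact Or.inl (h.trans rfl)
        | some q =>
          rw [hma] at h
          by_cases hq : q < b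
          · have e : pvUpd b (some q) = q := by simp [pvUpd, hq]
            right
            refine ⟨a, List.mem_cons_self .., ?_⟩
            rw [hma, e]
            rw [e] at h
            rw [h]
          · have e : pvUpd b (some q) = b := by simp [pvUpd, hq]
            exact Or.inl (h.trans e)
      · exact Or.inr ⟨x, List.mem_cons_of_mem _ hx, hmx⟩
    · intro x hx p hp
      rcases List.mem_cons.mp hx with rfl | hx'
      · have h2 : pvUpd b (m x) ≤ p := by
          unfold pvUpd; rw [hp]; dsimp only; split <;> omega
        exact ih1.trans h2
      · exact ih3 x hx' p hp

-- any window that looks up to priority g is literally a keyword of group g occurring in u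
lemma pv_get?_mem {κ ν : Type} [BEq κ] [LawfulBEq κ] (l : List (κ × ν)) (c : κ) (v : ν)
    (h : (PySem.Dict.mk l).get? c = some v) : (c, v) ∈ l := by
  induction l with
  | nil => simp [pysem] at h
  | cons p t ih =>
    obtain ⟨k, w⟩ := p
    rw [PySem.Dict.get?_mk_cons] at h
    split_ifs at h with hc
    · cases h
      have : k = c := beq_iff_eq.mp hc
      subst this
      exact List.mem_cons_self ..
    · exact List.mem_cons_of_mem _ (ih h)

set_option maxHeartbeats 1600000 in
-- any window that looks up to priority g is literally a keyword of group g
lemma pv_get_cases (c : List Char) (g : Nat) (h : PySem.Dict.get? pvKw c = some g) :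
    ∃ k : String, k ∈ pvGroupKeys g ∧ k.toList = c := by
  rw [pvKw_eq_mk] at h
  have hm := pv_get?_mem _ _ _ h
  simp only [List.mem_cons, List.not_mem_nil, or_false, Prod.mk.injEq] at hm
  rcases hm with ⟨rfl, rfl⟩|⟨rfl, rfl⟩|⟨rfl, rfl⟩|⟨rfl, rfl⟩|⟨rfl, rfl⟩|⟨rfl, rfl⟩|⟨rfl, rfl⟩|⟨rfl, rfl⟩|⟨rfl, rfl⟩|⟨rfl, rfl⟩|⟨rfl, rfl⟩|⟨rfl, rfl⟩|⟨rfl, rfl⟩|⟨rfl, rfl⟩|⟨rfl, rfl⟩|⟨rfl, rfl⟩|⟨rfl, rfl⟩|⟨rfl, rfl⟩|⟨rfl, rfl⟩|⟨rfl, rfl⟩|⟨rfl, rfl⟩|⟨rfl, rfl⟩|⟨rfl, rfl⟩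
  · exact ⟨"login", by decide, rfl⟩
  · exact ⟨"signin", by decide, rfl⟩
  · exact ⟨"auth", by decide, rfl⟩
  · exact ⟨"register", by decide, rfl⟩
  · exact ⟨"signup", by decide, rfl⟩
  · exact ⟨"kayit", by decide, rfl⟩
  · exact ⟨"cart", by decide, rfl⟩
  · exact ⟨"sepet", by decide, rfl⟩
  · exact ⟨"basket", by decide, rfl⟩
  · exact ⟨"checkout", by decide, rfl⟩
  · exact ⟨"payment", by decide, rfl⟩
  · exact ⟨"odeme", by decide, rfl⟩
  · exact ⟨"search", by decide, rfl⟩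
  · exact ⟨"arama", by decide, rfl⟩
  · exact ⟨"product", by decide, rfl⟩
  · exact ⟨"urun", by decide, rfl⟩
  · exact ⟨"item", by decide, rfl⟩
  · exact ⟨"dashboard", by decide, rfl⟩
  · exact ⟨"panel", by decide, rfl⟩
  · exact ⟨"admin", by decide, rfl⟩
  · exact ⟨"profile", by decide, rfl⟩
  · exact ⟨"account", by decide, rfl⟩
  · exact ⟨"hesap", by decide, rfl⟩

lemma pv_occ (k : String) (g : Nat) (u : List Char)
    (hget : PySem.Dict.get? pvKw k.toList = some g)
    (hlen : ((k.toList.length : Int)) ∈ pvLens)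
    (hne : k.toList ≠ [])
    (hin : PySem.Chars.isIn k.toList u = true) :
    ∃ x ∈ pvPairs u, pvLook u x = some g := by
  obtain ⟨j, hp⟩ := (PySem.Chars.exists_prefix_drop_iff_isIn k.toList u).mpr hin
  have hj : j < u.length := by
    by_contra hj
    rw [not_lt] at hj
    rw [List.drop_eq_nil_of_le hj] at hp
    exact hne (List.prefix_nil.mp hp)
  refine ⟨((j : Int), (k.toList.length : Int)), ?_, ?_⟩
  · simp only [pvPairs, List.mem_flatMap, List.mem_map]
    refine ⟨(j : Int), ?_, ⟨_, hlen, rfl⟩⟩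
    rw [PySem.List.mem_pyRange_one]
    exact ⟨Int.natCast_nonneg j, by exact_mod_cast hj⟩
  · unfold pvLook
    dsimp only
    rw [PySem.List.slice_natCast_add]
    rw [← List.prefix_iff_eq_take.mp hp]
    exact hget

lemma pv_hit_of_any (url : String) (g : Nat)
    (h : (pvGroupKeys g).any (fun k => PySem.Str.isIn k (PySem.Str.lower url)) = true) :
    ∃ x ∈ pvPairs ((PySem.Str.lower url).toList),
      pvLook ((PySem.Str.lower url).toList) x = some g := by
  obtain ⟨k, hk, hin⟩ := List.any_eq_true.mp h
  have hin' : PySem.Chars.isIn k.toList (PySem.Str.lower url).toList = true := by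
    simpa [PySem.Str.isIn_eq] using hin
  rcases g with _|_|_|_|_|_|_|_|g <;>
    simp only [pvGroupKeys, List.mem_cons, List.not_mem_nil, or_false] at hk
  all_goals rcases hk with rfl | rfl | rfl
  all_goals exact pv_occ _ _ _ (by decide) (by decide) (by decide) hin'

lemma pv_any_of_look (url : String) (x : Int × Int)
    (hx : x ∈ pvPairs ((PySem.Str.lower url).toList)) (g : Nat)
    (h : pvLook ((PySem.Str.lower url).toList) x = some g) :
    (pvGroupKeys g).any (fun k => PySem.Str.isIn k (PySem.Str.lower url)) = true := by
  simp only [pvPairs, List.mem_flatMap, List.mem_map] at hx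
  obtain ⟨i, hi, L, hL, rfl⟩ := hx
  have hi' := PySem.List.mem_pyRange_one.mp hi
  have hL0 : (0 : Int) ≤ i + L := by
    have hi0 := hi'.1
    simp only [pvLens, List.mem_cons, List.not_mem_nil, or_false] at hL
    rcases hL with rfl | rfl | rfl | rfl | rfl | rfl <;> omega
  unfold pvLook at h
  dsimp only at h
  rw [PySem.List.slice_toNat _ hi'.1 hL0] at h
  obtain ⟨k, hkmem, hkc⟩ := pv_get_cases _ _ h
  rw [List.any_eq_true]
  refine ⟨k, hkmem, ?_⟩
  rw [PySem.Str.isIn_iff_infix]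
  rw [hkc]
  exact ((List.take_prefix _ _).isInfix).trans ((List.drop_suffix _ _).isInfix)

set_option maxHeartbeats 1600000 in
lemma pv_best_char (url : String) :
    pvBest ((PySem.Str.lower url).toList) =
      (if ["login", "signin", "auth"].any (fun k => PySem.Str.isIn k (PySem.Str.lower url)) then 0
       else if ["register", "signup", "kayit"].any (fun k => PySem.Str.isIn k (PySem.Str.lower url)) then 1
       else if ["cart", "sepet", "basket"].any (fun k => PySem.Str.isIn k (PySem.Str.lower url)) then 2
       else if ["checkout", "payment", "odeme"].any (fun k => PySem.Str.isIn k (PySem.Str.lower url)) then 3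
       else if ["search", "arama"].any (fun k => PySem.Str.isIn k (PySem.Str.lower url)) then 4
       else if ["product", "urun", "item"].any (fun k => PySem.Str.isIn k (PySem.Str.lower url)) then 5
       else if ["dashboard", "panel", "admin"].any (fun k => PySem.Str.isIn k (PySem.Str.lower url)) then 6
       else if ["profile", "account", "hesap"].any (fun k => PySem.Str.isIn k (PySem.Str.lower url)) then 7
       else 8) := by
  have main : ∀ r : Nat, r ≤ 8 →
      (r = 8 ∨ ∃ x ∈ pvPairs ((PySem.Str.lower url).toList),
        pvLook ((PySem.Str.lower url).toList) x = some r) →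
      (∀ x ∈ pvPairs ((PySem.Str.lower url).toList), ∀ p,
        pvLook ((PySem.Str.lower url).toList) x = some p → r ≤ p) →
      r = (if ["login", "signin", "auth"].any (fun k => PySem.Str.isIn k (PySem.Str.lower url)) then 0
       else if ["register", "signup", "kayit"].any (fun k => PySem.Str.isIn k (PySem.Str.lower url)) then 1
       else if ["cart", "sepet", "basket"].any (fun k => PySem.Str.isIn k (PySem.Str.lower url)) then 2
       else if ["checkout", "payment", "odeme"].any (fun k => PySem.Str.isIn k (PySem.Str.lower url)) then 3
       else if ["search", "arama"].any (fun k => PySem.Str.isIn k (PySem.Str.lower url)) then 4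
       else if ["product", "urun", "item"].any (fun k => PySem.Str.isIn k (PySem.Str.lower url)) then 5
       else if ["dashboard", "panel", "admin"].any (fun k => PySem.Str.isIn k (PySem.Str.lower url)) then 6
       else if ["profile", "account", "hesap"].any (fun k => PySem.Str.isIn k (PySem.Str.lower url)) then 7
       else 8) := by
    intro r hub hex hmin
    have hAny : ∀ g, (pvGroupKeys g).any (fun k => PySem.Str.isIn k (PySem.Str.lower url)) = true → r ≤ g := by
      intro g hg
      obtain ⟨x, hx, hlook⟩ := pv_hit_of_any url g hg
      exact hmin x hx g hlook
    have hHit : r ≠ 8 → (pvGroupKeys r).any (fun k => PySem.Str.isIn k (PySem.Str.lower url)) = true := by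
      intro h8
      rcases hex with h | ⟨x, hx, hlook⟩
      · exact absurd h h8
      · exact pv_any_of_look url x hx r hlook
    split_ifs with h1 h2 h3 h4 h5 h6 h7 h8
    · have hle : r ≤ 0 := hAny 0 h1
      interval_cases r
      rfl
    · have hle : r ≤ 1 := hAny 1 h2
      interval_cases r
      · have hc := hHit (by omega)
        simp only [pvGroupKeys] at hc
        exact absurd hc h1
      · rfl
    · have hle : r ≤ 2 := hAny 2 h3
      interval_cases r
      · have hc := hHit (by omega)
        simp only [pvGroupKeys] at hc
        exact absurd hc h1
      · have hc := hHit (by omega)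
        simp only [pvGroupKeys] at hc
        exact absurd hc h2
      · rfl
    · have hle : r ≤ 3 := hAny 3 h4
      interval_cases r
      · have hc := hHit (by omega)
        simp only [pvGroupKeys] at hc
        exact absurd hc h1
      · have hc := hHit (by omega)
        simp only [pvGroupKeys] at hc
        exact absurd hc h2
      · have hc := hHit (by omega)
        simp only [pvGroupKeys] at hc
        exact absurd hc h3
      · rfl
    · have hle : r ≤ 4 := hAny 4 h5
      interval_cases r
      · have hc := hHit (by omega)
        simp only [pvGroupKeys] at hc
        exact absurd hc h1
      · have hc := hHit (by omega)
        simp only [pvGroupKeys] at hc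
        exact absurd hc h2
      · have hc := hHit (by omega)
        simp only [pvGroupKeys] at hc
        exact absurd hc h3
      · have hc := hHit (by omega)
        simp only [pvGroupKeys] at hc
        exact absurd hc h4
      · rfl
    · have hle : r ≤ 5 := hAny 5 h6
      interval_cases r
      · have hc := hHit (by omega)
        simp only [pvGroupKeys] at hc
        exact absurd hc h1
      · have hc := hHit (by omega)
        simp only [pvGroupKeys] at hc
        exact absurd hc h2
      · have hc := hHit (by omega)
        simp only [pvGroupKeys] at hc
        exact absurd hc h3
      · have hc := hHit (by omega)
        simp only [pvGroupKeys] at hc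
        exact absurd hc h4
      · have hc := hHit (by omega)
        simp only [pvGroupKeys] at hc
        exact absurd hc h5
      · rfl
    · have hle : r ≤ 6 := hAny 6 h7
      interval_cases r
      · have hc := hHit (by omega)
        simp only [pvGroupKeys] at hc
        exact absurd hc h1
      · have hc := hHit (by omega)
        simp only [pvGroupKeys] at hc
        exact absurd hc h2
      · have hc := hHit (by omega)
        simp only [pvGroupKeys] at hc
        exact absurd hc h3
      · have hc := hHit (by omega)
        simp only [pvGroupKeys] at hc
        exact absurd hc h4
      · have hc := hHit (by omega)
        simp only [pvGroupKeys] at hc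
        exact absurd hc h5
      · have hc := hHit (by omega)
        simp only [pvGroupKeys] at hc
        exact absurd hc h6
      · rfl
    · have hle : r ≤ 7 := hAny 7 h8
      interval_cases r
      · have hc := hHit (by omega)
        simp only [pvGroupKeys] at hc
        exact absurd hc h1
      · have hc := hHit (by omega)
        simp only [pvGroupKeys] at hc
        exact absurd hc h2
      · have hc := hHit (by omega)
        simp only [pvGroupKeys] at hc
        exact absurd hc h3
      · have hc := hHit (by omega)
        simp only [pvGroupKeys] at hc
        exact absurd hc h4
      · have hc := hHit (by omega)
        simp only [pvGroupKeys] at hc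
        exact absurd hc h5
      · have hc := hHit (by omega)
        simp only [pvGroupKeys] at hc
        exact absurd hc h6
      · have hc := hHit (by omega)
        simp only [pvGroupKeys] at hc
        exact absurd hc h7
      · rfl
    · have hle : r ≤ 8 := hub
      interval_cases r
      · have hc := hHit (by omega)
        simp only [pvGroupKeys] at hc
        exact absurd hc h1
      · have hc := hHit (by omega)
        simp only [pvGroupKeys] at hc
        exact absurd hc h2
      · have hc := hHit (by omega)
        simp only [pvGroupKeys] at hc
        exact absurd hc h3
      · have hc := hHit (by omega)
        simp only [pvGroupKeys] at hc
        exact absurd hc h4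
      · have hc := hHit (by omega)
        simp only [pvGroupKeys] at hc
        exact absurd hc h5
      · have hc := hHit (by omega)
        simp only [pvGroupKeys] at hc
        exact absurd hc h6
      · have hc := hHit (by omega)
        simp only [pvGroupKeys] at hc
        exact absurd hc h7
      · have hc := hHit (by omega)
        simp only [pvGroupKeys] at hc
        exact absurd hc h8
      · rfl
  obtain ⟨hub, hex, hmin⟩ :=
    pv_foldUpd (pvLook ((PySem.Str.lower url).toList)) (pvPairs ((PySem.Str.lower url).toList)) 8
  exact main _ hub hex hmin

-- ===== VERDICT (by name: the statement is the Claim_ definition above) =====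
set_option maxHeartbeats 1600000 in
theorem infer_context_from_url_py_spec : Claim_equal_infer_context_from_url_py := by
  intro url _
  unfold Spec_infer_context_from_url_py
  rw [pv_alt_eq, pv_best_char]
  simp only [infer_context_from_url_py]
  split_ifs <;> rfl
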